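-- pv_equiv track=rewrite | github.com/Jij-Inc/Qamomile | qamomile/optimization/pce.py | min_num_qubits
-- ===== SOURCE A (Python) =====
-- import math
--
-- def min_num_qubits(num_vars: int, k: int) -> int:
--     """Return the smallest ``n`` with ``C(n, k) * 3**k >= num_vars``.
--
--     Args:
--         num_vars (int): Number of variables to encode. Must be
--             non-negative.
--         k (int): Compression rate (number of non-identity Paulis per
--             correlator). Must be a positive integer.
--
--     Returns:
--         int: The minimum number of qubits required to host
--         ``num_vars`` distinct :math:`k`-body Pauli correlators.
--
--     Raises:
--         ValueError: If ``k`` is not a positive integer or ``num_vars``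
--             is negative.
--
--     Example:
--         >>> PCEEncoder.min_num_qubits(num_vars=10, k=2)
--         3
--     """
--     if k < 1:
--         raise ValueError(f"k must be a positive integer, got {k}.")
--     if num_vars < 0:
--         raise ValueError(f"num_vars must be non-negative, got {num_vars}.")
--     if num_vars == 0:
--         return k
--
--     n = k
--     while math.comb(n, k) * (3**k) < num_vars:
--         n += 1
--     return n
-- ===== SOURCE B (Python) =====
-- import math
--
-- def min_num_qubits(num_vars: int, k: int) -> int:
--     """Smallest n with C(n,k) * 3**k >= num_vars, by exponential + binary search."""
--     if k < 1:
--         raise ValueError(f"k must be a positive integer, got {k}.")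
--     if num_vars < 0:
--         raise ValueError(f"num_vars must be non-negative, got {num_vars}.")
--     if num_vars == 0:
--         return k
--     # C(n,k)*3**k is nondecreasing in n and is 0 for n < k: gallop for an
--     # upper bound k + j, then binary search [k, k + j] for the least such n.
--     c = 3 ** k
--     j = 1
--     while math.comb(k + j, k) * c < num_vars:
--         j *= 2
--     lo, hi = k, k + j
--     while lo < hi:
--         mid = (lo + hi) // 2
--         if math.comb(mid, k) * c < num_vars:
--             lo = mid + 1
--         else:
--             hi = mid
--     return lo
-- ===== Notes on version B (the rewrite author's own statement) =====
-- stated objective: alternative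
-- what changed: replaced A's linear scan n = k, k+1, ... with a galloping upper-bound search followed by a binary search, exploiting that C(n,k)*3^k is nondecreasing in n
import Mathlib
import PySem

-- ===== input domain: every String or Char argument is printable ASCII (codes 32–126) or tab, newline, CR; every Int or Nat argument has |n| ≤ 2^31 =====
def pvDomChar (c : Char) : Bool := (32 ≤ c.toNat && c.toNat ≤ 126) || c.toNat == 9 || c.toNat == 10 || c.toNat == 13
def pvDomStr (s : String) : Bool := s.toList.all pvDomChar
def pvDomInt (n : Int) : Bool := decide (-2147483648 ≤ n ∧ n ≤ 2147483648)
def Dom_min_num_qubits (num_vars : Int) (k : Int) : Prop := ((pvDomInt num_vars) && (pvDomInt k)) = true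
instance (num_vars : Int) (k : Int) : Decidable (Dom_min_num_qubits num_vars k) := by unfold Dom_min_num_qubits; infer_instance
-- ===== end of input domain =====

-- B replaces A's linear scan for the smallest n with C(n,k)*3^k >= num_vars by a
-- galloping + binary search (C(n,k)*3^k is nondecreasing in n): a different algorithm,
-- fewer comb evaluations; measured wall time is comparable (3^k dominates).


-- ===== PORT A =====
-- A's `while math.comb(n, k) * 3**k < num_vars: n += 1` loop; the proof argument
-- `hK : 1 ≤ K` (guaranteed by A's `k < 1` raise, i.e. by Pre_) only serves termination.
-- strict growth step, shared by the termination arguments of both ports' loops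
lemma fStep (K' m : Nat) (hm : K' ≤ m) :
    Nat.choose m (K' + 1) * 3 ^ (K' + 1) < Nat.choose (m + 1) (K' + 1) * 3 ^ (K' + 1) := by
  rw [Nat.choose_succ_succ', Nat.add_mul]
  exact Nat.lt_add_of_pos_left (Nat.mul_pos (Nat.choose_pos hm) (Nat.pow_pos (Nat.succ_pos 2)))

lemma aLoop_dec (V K n : Nat) (hK : 1 ≤ K) (hg : Nat.choose n K * 3 ^ K < V) :
    (K - (n + 1)) + (V - Nat.choose (n + 1) K * 3 ^ K) <
      (K - n) + (V - Nat.choose n K * 3 ^ K) := by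
  have h1 : Nat.choose n K * 3 ^ K ≤ Nat.choose (n + 1) K * 3 ^ K :=
    Nat.mul_le_mul_right _ (Nat.choose_le_choose K (Nat.le_succ n))
  cases Nat.lt_or_ge n K with
  | inl hn =>
      exact Nat.add_lt_add_of_lt_of_le (Nat.sub_succ_lt_self K n hn) (Nat.sub_le_sub_left h1 V)
  | inr hn =>
      obtain ⟨K', rfl⟩ := Nat.exists_eq_add_one.mpr hK
      have key := fStep K' n (Nat.le_of_succ_le hn)
      rw [Nat.sub_eq_zero_of_le (Nat.le_succ_of_le hn), Nat.sub_eq_zero_of_le hn,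
        Nat.zero_add, Nat.zero_add]
      exact Nat.sub_lt_sub_left hg key

def aLoop (V K n : Nat) (hK : 1 ≤ K) : Nat :=
  if Nat.choose n K * 3 ^ K < V then aLoop V K (n + 1) hK else n
termination_by (K - n) + (V - Nat.choose n K * 3 ^ K)
decreasing_by exact aLoop_dec V K n hK (by assumption)

lemma toNat_ge_one (k : Int) (hk : ¬ k < 1) : 1 ≤ k.toNat :=
  Int.toNat_le_toNat (Int.not_lt.mp hk)

def min_num_qubits (num_vars : Int) (k : Int) : Int :=
  if hk : k < 1 then 0            -- A raises ValueError here (outside Pre_)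
  else if num_vars < 0 then 0     -- A raises ValueError here (outside Pre_)
  else if num_vars = 0 then k
  else ((aLoop num_vars.toNat k.toNat k.toNat (toNat_ge_one k hk) : Nat) : Int)

-- ===== PORT B =====
-- Source B's `while math.comb(k + j, k) * c < num_vars: j *= 2` gallop loop; the proof
-- arguments hK, hj (invariants of B's algorithm) only serve termination.
lemma gallop_hj (j : Nat) (hj : 1 ≤ j) : 1 ≤ 2 * j :=
  Nat.le_trans hj (Nat.le_mul_of_pos_left j (Nat.succ_pos 1))

lemma gallop_dec (V K j : Nat) (hK : 1 ≤ K) (hj : 1 ≤ j)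
    (hg : Nat.choose (K + j) K * 3 ^ K < V) :
    V - Nat.choose (K + 2 * j) K * 3 ^ K < V - Nat.choose (K + j) K * 3 ^ K := by
  have hjj : j + 1 ≤ 2 * j := by rw [Nat.two_mul]; exact Nat.add_le_add_left hj j
  have h1 : Nat.choose (K + j + 1) K * 3 ^ K ≤ Nat.choose (K + 2 * j) K * 3 ^ K :=
    Nat.mul_le_mul_right _ (Nat.choose_le_choose K
      (by rw [Nat.add_assoc]; exact Nat.add_le_add_left hjj K))
  obtain ⟨K', rfl⟩ := Nat.exists_eq_add_one.mpr hK
  have key := fStep K' (K' + 1 + j) (Nat.le_trans (Nat.le_succ K') (Nat.le_add_right _ j))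
  exact Nat.sub_lt_sub_left hg (Nat.lt_of_lt_of_le key h1)

def gallop (V K j : Nat) (hK : 1 ≤ K) (hj : 1 ≤ j) : Nat :=
  if Nat.choose (K + j) K * 3 ^ K < V then gallop V K (2 * j) hK (gallop_hj j hj) else j
termination_by V - Nat.choose (K + j) K * 3 ^ K
decreasing_by exact gallop_dec V K j hK hj (by assumption)

lemma bsearch_dec1 (lo hi : Nat) (h : lo < hi) : hi - ((lo + hi) / 2 + 1) < hi - lo :=
  Nat.sub_lt_sub_left h (Nat.lt_succ_of_le (Nat.le_avg_left h.le))
lemma bsearch_dec2 (lo hi : Nat) (h : lo < hi) : (lo + hi) / 2 - lo < hi - lo :=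
  Nat.sub_lt_sub_right (Nat.le_avg_left h.le) (Nat.avg_lt_right h)

-- Source B's `while lo < hi` binary-search loop.
def bsearch (V K lo hi : Nat) : Nat :=
  if lo < hi then
    let mid := (lo + hi) / 2
    if Nat.choose mid K * 3 ^ K < V then bsearch V K (mid + 1) hi
    else bsearch V K lo mid
  else lo
termination_by hi - lo
decreasing_by
  · exact bsearch_dec1 lo hi (by assumption)
  · exact bsearch_dec2 lo hi (by assumption)

def min_num_qubits_alt (num_vars : Int) (k : Int) : Int :=
  if hk : k < 1 then 0            -- B raises ValueError here (outside Pre_)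
  else if num_vars < 0 then 0     -- B raises ValueError here (outside Pre_)
  else if num_vars = 0 then k
  else
    let j := gallop num_vars.toNat k.toNat 1 (toNat_ge_one k hk) (Nat.le_refl 1)
    ((bsearch num_vars.toNat k.toNat k.toNat (k.toNat + j) : Nat) : Int)

-- ===== PRECONDITION & SPEC =====
-- Pre_ excludes exactly the inputs on which A raises ValueError: k < 1 or num_vars < 0.
def Pre_min_num_qubits (num_vars : Int) (k : Int) : Prop := 1 ≤ k ∧ 0 ≤ num_vars
instance (num_vars : Int) (k : Int) : Decidable (Pre_min_num_qubits num_vars k) := by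
  unfold Pre_min_num_qubits; infer_instance
def pvWitness_min_num_qubits : Int × Int := (10, 2)

def Spec_min_num_qubits (num_vars : Int) (k : Int) (out : Int) : Prop := out = min_num_qubits_alt num_vars k
instance (num_vars : Int) (k : Int) (out : Int) : Decidable (Spec_min_num_qubits num_vars k out) := by unfold Spec_min_num_qubits; infer_instance

-- ===== CLAIM (what is proved, stated in full; the proofs are below) =====
def Claim_equal_min_num_qubits : Prop := ∀ (num_vars : Int) (k : Int), Dom_min_num_qubits num_vars k → Pre_min_num_qubits num_vars k → Spec_min_num_qubits num_vars k (min_num_qubits num_vars k)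

-- ===== LEMMAS AND PROOFS =====

lemma fMono (K : Nat) {m n : Nat} (h : m ≤ n) :
    Nat.choose m K * 3 ^ K ≤ Nat.choose n K * 3 ^ K :=
  Nat.mul_le_mul_right _ (Nat.choose_le_choose K h)

-- A's loop returns the least index ≥ its start whose value reaches V.
lemma aLoop_spec (V K n : Nat) (hK : 1 ≤ K) :
    (∀ m, m < n → Nat.choose m K * 3 ^ K < V) →
    V ≤ Nat.choose (aLoop V K n hK) K * 3 ^ K ∧
      ∀ m, m < aLoop V K n hK → Nat.choose m K * 3 ^ K < V := by
  fun_induction aLoop with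
  | case1 n hguard ih =>
      intro hlow
      exact ih (fun m hm => by
        rcases Nat.lt_succ_iff_lt_or_eq.1 hm with h | h
        · exact hlow m h
        · subst h; exact hguard)
  | case2 n hguard =>
      intro hlow
      exact ⟨Nat.le_of_not_lt hguard, hlow⟩

-- B's binary search returns the least index whose value reaches V.
lemma bsearch_spec (V K lo hi : Nat) :
    lo ≤ hi →
    (∀ m, m < lo → Nat.choose m K * 3 ^ K < V) →
    V ≤ Nat.choose hi K * 3 ^ K →
    V ≤ Nat.choose (bsearch V K lo hi) K * 3 ^ K ∧
      ∀ m, m < bsearch V K lo hi → Nat.choose m K * 3 ^ K < V := by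
  fun_induction bsearch with
  | case1 lo hi hlt mid hguard ih =>
      intro _ hlow hhi
      refine ih (by omega) (fun m hm => ?_) hhi
      exact Nat.lt_of_le_of_lt (fMono K (by omega)) hguard
  | case2 lo hi hlt mid hguard ih =>
      intro _ hlow _
      exact ih (by omega) hlow (Nat.le_of_not_lt hguard)
  | case3 lo hi hlt =>
      intro hle hlow hhi
      have : lo = hi := by omega
      subst this
      exact ⟨hhi, hlow⟩

-- B's gallop stops at an upper bound whose value reaches V.
lemma gallop_spec (V K j : Nat) (hK : 1 ≤ K) (hj : 1 ≤ j) :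
    V ≤ Nat.choose (K + gallop V K j hK hj) K * 3 ^ K := by
  fun_induction gallop with
  | case1 j hj hguard ih => exact ih
  | case2 j hj hguard => exact Nat.le_of_not_lt hguard

lemma least_unique {f : Nat → Nat} {V a b : Nat}
    (ha : V ≤ f a) (ha' : ∀ m, m < a → f m < V)
    (hb : V ≤ f b) (hb' : ∀ m, m < b → f m < V) : a = b := by
  rcases Nat.lt_trichotomy a b with h | h | h
  · exact absurd ha (Nat.not_le_of_lt (hb' a h))
  · exact h
  · exact absurd hb (Nat.not_le_of_lt (ha' b h))

-- ===== VERDICT (by name: the statement is the Claim_ definition above) =====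
theorem min_num_qubits_spec : Claim_equal_min_num_qubits := by
  intro num_vars k _ hPre
  obtain ⟨hk, hv⟩ := hPre
  unfold Spec_min_num_qubits min_num_qubits min_num_qubits_alt
  rw [dif_neg (by omega : ¬ k < 1), dif_neg (by omega : ¬ k < 1),
    if_neg (by omega : ¬ num_vars < 0), if_neg (by omega : ¬ num_vars < 0)]
  by_cases h0 : num_vars = 0
  · rw [if_pos h0, if_pos h0]
  · rw [if_neg h0, if_neg h0]
    set V := num_vars.toNat with hV
    set K := k.toNat with hKdef
    have hK1 : 1 ≤ K := by omega
    have hV1 : 1 ≤ V := by omega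
    have hlow : ∀ m, m < K → Nat.choose m K * 3 ^ K < V := by
      intro m hm
      rw [Nat.choose_eq_zero_of_lt hm]
      simpa using hV1
    have hA := aLoop_spec V K K (by omega) hlow
    have hhi := gallop_spec V K 1 (by omega) (by omega)
    have hB := bsearch_spec V K K (K + gallop V K 1 (by omega) (by omega))
      (by omega) hlow hhi
    have hNat : aLoop V K K (by omega) =
        bsearch V K K (K + gallop V K 1 (by omega) (by omega)) :=
      least_unique (f := fun m => Nat.choose m K * 3 ^ K) hA.1 hA.2 hB.1 hB.2
    exact congrArg Int.ofNat hNat
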